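-- pv_equiv track=rewrite | github.com/ByeongJun-Jang/Algorithm | groomlevel_연속점수.py | solution
-- ===== SOURCE A (Python) =====
-- def solution(num,score):
--   start = score[0]
--   sum = score[0]
--   maxx = score[0]
--   for c in score[1:] :
--     if c-start == 1:
--       sum += c
--     else:
--       sum = c
--
--     maxx = max(maxx,sum)
--     start = c
--
--   return maxx
-- ===== SOURCE B (Python) =====
-- def solution(num, score):
--     # Phase 1: split score into maximal runs where each step increases by exactly 1.
--     runs = []
--     cur = [score[0]]
--     for c in score[1:]:
--         if c - cur[-1] == 1:
--             cur.append(c)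
--         else:
--             runs.append(cur)
--             cur = [c]
--     runs.append(cur)
--     # Phase 2: the answer is the largest prefix sum over all runs.
--     best = None
--     for run in runs:
--         acc = 0
--         for x in run:
--             acc = acc + x
--             if best is None or acc > best:
--                 best = acc
--     return best
-- ===== Notes on version B (the rewrite author's own statement) =====
-- stated objective: alternative
-- what changed: B first splits the scores into maximal consecutive-by-1 runs (phase 1) and then returns the largest prefix sum taken over all runs (phase 2), instead of A's single pass with an in-place resetting accumulator and running maximum.
import Mathlib
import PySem

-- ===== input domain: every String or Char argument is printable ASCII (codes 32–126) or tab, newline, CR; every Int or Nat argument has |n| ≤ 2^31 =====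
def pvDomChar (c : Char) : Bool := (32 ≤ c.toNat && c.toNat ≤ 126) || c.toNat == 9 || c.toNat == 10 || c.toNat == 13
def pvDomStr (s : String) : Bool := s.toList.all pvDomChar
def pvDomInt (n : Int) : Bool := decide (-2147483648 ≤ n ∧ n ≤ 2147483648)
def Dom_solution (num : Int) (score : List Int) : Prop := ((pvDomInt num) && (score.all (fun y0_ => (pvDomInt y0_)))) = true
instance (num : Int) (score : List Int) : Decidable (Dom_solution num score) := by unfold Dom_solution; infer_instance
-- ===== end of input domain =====

-- B re-decomposes A's resetting single pass as: split into maximal +1-runs, then take the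
-- largest prefix sum over all runs (objective: alternative; same O(n) cost).

-- ===== PORT A =====
-- loop body of A: state (start, sum, maxx)
def stepA (acc : Int × Int × Int) (c : Int) : Int × Int × Int :=
  let sum := if c - acc.1 = 1 then acc.2.1 + c else c
  (c, sum, max acc.2.2 sum)

def solution (num : Int) (score : List Int) : Int :=
  match score with
  | [] => 0   -- score[0] raises IndexError here; excluded by Pre_solution
  | s0 :: _ => ((PySem.List.slice score (some 1) none).foldl stepA (s0, s0, s0)).2.2

-- ===== PORT B =====
-- phase-1 loop body: state (runs, cur); cur[-1] via pyGetD (cur is never empty)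
def stepRun (st : List (List Int) × List Int) (c : Int) : List (List Int) × List Int :=
  if c - PySem.List.pyGetD st.2 (-1) 0 = 1 then (st.1, st.2 ++ [c]) else (st.1 ++ [st.2], [c])

-- `if best is None or acc > best: best = acc`
def updBest (best : Option Int) (acc : Int) : Option Int :=
  match best with
  | none => some acc
  | some b => if acc > b then some acc else some b

-- inner phase-2 loop body: state (best, acc)
def stepIn (p : Option Int × Int) (x : Int) : Option Int × Int :=
  (updBest p.1 (p.2 + x), p.2 + x)

-- outer phase-2 loop body: one run, acc restarts at 0
def stepOut (best : Option Int) (run : List Int) : Option Int :=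
  (run.foldl stepIn (best, 0)).1

def solution_alt (num : Int) (score : List Int) : Int :=
  match score with
  | [] => 0   -- score[0] raises IndexError here; excluded by Pre_solution
  | s0 :: _ =>
    let st := (PySem.List.slice score (some 1) none).foldl stepRun ([], [s0])
    let runs := st.1 ++ [st.2]
    match runs.foldl stepOut none with
    | some b => b
    | none => 0   -- unreachable: runs is nonempty and every run is nonempty

-- ===== PRECONDITION & SPEC =====
-- A (and B) index score[0]: the empty list raises IndexError in both.
def Pre_solution (num : Int) (score : List Int) : Prop := score ≠ []
instance (num : Int) (score : List Int) : Decidable (Pre_solution num score) := by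
  unfold Pre_solution; infer_instance
def pvWitness_solution : Int × List Int := (3, [1, 2, 3, -1, 0, 1])

def Spec_solution (num : Int) (score : List Int) (out : Int) : Prop := out = solution_alt num score
instance (num : Int) (score : List Int) (out : Int) : Decidable (Spec_solution num score out) := by unfold Spec_solution; infer_instance

-- ===== CLAIM (what is proved, stated in full; the proofs are below) =====
def Claim_equal_solution : Prop := ∀ (num : Int) (score : List Int), Dom_solution num score → Pre_solution num score → Spec_solution num score (solution num score)

-- ===== LEMMAS AND PROOFS =====

-- the sequence of values A's `sum` takes along the loop
def asums (start sum : Int) : List Int → List Int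
  | [] => []
  | c :: t => let s' := if c - start = 1 then sum + c else c; s' :: asums c s' t

-- prefix sums of a run, starting from acc
def psums (acc : Int) : List Int → List Int
  | [] => []
  | x :: t => (acc + x) :: psums (acc + x) t

theorem psums_append_singleton (cur : List Int) (a c : Int) :
    psums a (cur ++ [c]) = psums a cur ++ [a + cur.sum + c] := by
  induction cur generalizing a with
  | nil => simp [psums]
  | cons x t ih => simp [List.cons_append, psums, ih, List.sum_cons, add_assoc]

theorem foldlA_eq (rest : List Int) (start sum maxx : Int) :
    (rest.foldl stepA (start, sum, maxx)).2.2 = (asums start sum rest).foldl max maxx := by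
  induction rest generalizing start sum maxx with
  | nil => rfl
  | cons c t ih => simp only [List.foldl_cons, stepA, asums]; exact ih c _ _

theorem foldl_stepIn (run : List Int) (best : Option Int) (acc : Int) :
    run.foldl stepIn (best, acc) = ((psums acc run).foldl updBest best, acc + run.sum) := by
  induction run generalizing best acc with
  | nil => simp [psums]
  | cons x t ih => simp [psums, stepIn, ih, add_assoc]

theorem foldl_stepOut (runs : List (List Int)) (best : Option Int) :
    runs.foldl stepOut best = (runs.flatMap (psums 0)).foldl updBest best := by
  induction runs generalizing best with
  | nil => rfl
  | cons r rs ih => simp [stepOut, foldl_stepIn, ih]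

theorem updBest_some (m v : Int) : updBest (some m) v = some (max m v) := by
  by_cases hv : m ≤ v <;> simp [updBest, max_def, hv] <;> omega

theorem foldl_updBest_some (l : List Int) (m : Int) :
    l.foldl updBest (some m) = some (l.foldl max m) := by
  induction l generalizing m with
  | nil => rfl
  | cons v t ih => simp only [List.foldl_cons, updBest_some]; exact ih _

-- phase-1 invariant: the flattened per-run prefix sums are exactly A's sum-sequence
theorem phase1_flat (rest : List Int) (runs : List (List Int)) (cur : List Int)
    (start sum : Int) (hne : cur ≠ [])
    (hstart : PySem.List.pyGetD cur (-1) 0 = start) (hsum : cur.sum = sum) :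
    (((rest.foldl stepRun (runs, cur)).1 ++ [(rest.foldl stepRun (runs, cur)).2]).flatMap (psums 0))
      = runs.flatMap (psums 0) ++ psums 0 cur ++ asums start sum rest := by
  induction rest generalizing runs cur start sum with
  | nil => simp [asums]
  | cons c t ih =>
    simp only [List.foldl_cons, stepRun, hstart, asums]
    by_cases h : c - start = 1
    · rw [if_pos h, if_pos h]
      rw [ih runs (cur ++ [c]) c (sum + c) (by simp)
        (PySem.List.pyGetD_neg_one_append_singleton cur c 0) (by simp [hsum]),
        psums_append_singleton]
      simp [hsum]
    · rw [if_neg h, if_neg h]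
      rw [ih (runs ++ [cur]) [c] c c (by simp)
        (PySem.List.pyGetD_neg_one_append_singleton [] c 0) (by simp)]
      simp [psums, List.flatMap_append, List.append_assoc]

-- ===== VERDICT (by name: the statement is the Claim_ definition above) =====
theorem solution_spec : Claim_equal_solution := by
  intro num score _ hpre
  match score with
  | [] => exact absurd rfl hpre
  | s0 :: rest' =>
    show solution num (s0 :: rest') = solution_alt num (s0 :: rest')
    simp only [solution, solution_alt, PySem.List.slice_from_one, List.tail_cons]
    rw [foldl_stepOut, phase1_flat rest' [] [s0] s0 s0 (by simp)
      (PySem.List.pyGetD_neg_one_append_singleton [] s0 0) (by simp)]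
    simp only [List.flatMap_nil, List.nil_append, psums, List.singleton_append, List.foldl_cons]
    have h0 : updBest none (0 + s0) = some (0 + s0) := rfl
    rw [h0, foldl_updBest_some]
    simp [foldlA_eq]
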